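-- pv_equiv track=rewrite | github.com/whywhs/Leetcode | Leetcode42_H.py | my_count
-- ===== SOURCE A (Python) =====
-- def my_count(list_my):
--     if len(list_my)<3:
--         return 0
--     k,j = 0,1
--     while(k+1<len(list_my) and list_my[k+1]>=list_my[-1]):
--         list_my.pop(k)
--     while(j+1<=len(list_my) and list_my[-j-1]>=list_my[0]):
--         list_my.pop()
--     h = min(list_my[0],list_my[-1])
--     w = len(list_my)
--     size = (w-2)*h
--     for i in list_my[1:len(list_my)-1]:
--         size -= i
--     return size
-- ===== SOURCE B (Python) =====
-- def my_count(list_my):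
--     # Single pass with index pointers; no mutation of the input (A pops elements in place).
--     n = len(list_my)
--     if n < 3:
--         return 0
--     last = list_my[-1]
--     i = 0
--     while i + 1 < n and list_my[i + 1] >= last:
--         i += 1
--     head = list_my[i]
--     e = n - 1
--     while e > i and list_my[e - 1] >= head:
--         e -= 1
--     return (e - i - 1) * min(head, list_my[e]) - sum(list_my[i + 1:e])
-- ===== Notes on version B (the rewrite author's own statement) =====
-- stated objective: faster
-- what changed: B replaces A's repeated in-place pop(0)/pop() trimming (each front pop is O(n)) by two index pointers scanned over the unchanged list and a single slice sum, and it does not mutate the input.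
import Mathlib
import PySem

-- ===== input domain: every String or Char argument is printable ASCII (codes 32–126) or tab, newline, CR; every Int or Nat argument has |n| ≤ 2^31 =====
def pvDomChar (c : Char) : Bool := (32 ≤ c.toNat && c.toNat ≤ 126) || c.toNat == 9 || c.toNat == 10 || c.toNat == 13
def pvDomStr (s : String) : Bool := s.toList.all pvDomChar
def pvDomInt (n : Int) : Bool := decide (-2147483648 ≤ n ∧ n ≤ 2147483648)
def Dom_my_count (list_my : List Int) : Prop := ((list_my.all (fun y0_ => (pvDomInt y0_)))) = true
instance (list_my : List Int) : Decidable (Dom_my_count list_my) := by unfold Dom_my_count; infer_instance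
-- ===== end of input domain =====

-- B replaces A's in-place front/back popping (O(n^2)) by index pointers over the unchanged list
-- plus one slice sum (O(n)); equivalence is about the RETURN value only (A mutates its argument).


-- ===== PORT A =====
-- first while loop: pop(0) while list_my[1] >= list_my[-1] (guard makes both indexings in range,
-- so pyGetD is exact; pop(0) on a nonempty list is tail)
def aTrimL (L : List Int) : List Int :=
  if h : 1 < L.length ∧ PySem.List.pyGetD L 1 0 ≥ PySem.List.pyGetD L (-1) 0 then
    aTrimL L.tail
  else L
termination_by L.length
decreasing_by simp [List.length_tail]; omega

-- second while loop (j stays 1): pop() while list_my[-2] >= list_my[0]; pop() = dropLast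
def aTrimR (L : List Int) : List Int :=
  if h : 2 ≤ L.length ∧ PySem.List.pyGetD L (-2) 0 ≥ PySem.List.pyGetD L 0 0 then
    aTrimR L.dropLast
  else L
termination_by L.length
decreasing_by simp [List.length_dropLast]; omega

def my_count (list_my : List Int) : Int :=
  if list_my.length < 3 then 0
  else
    let L2 := aTrimR (aTrimL list_my)
    let h := min (PySem.List.pyGetD L2 0 0) (PySem.List.pyGetD L2 (-1) 0)
    let w : Int := L2.length
    let size := (w - 2) * h
    (PySem.List.slice L2 (some 1) (some (w - 1))).foldl (fun s i => s - i) size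

-- ===== PORT B =====
-- while i + 1 < n and list_my[i+1] >= last: i += 1   (index in range under the guard)
def bTrimI (L : List Int) (last : Int) (i : Nat) : Nat :=
  if i + 1 < L.length ∧ L.getD (i + 1) 0 ≥ last then bTrimI L last (i + 1) else i
termination_by L.length - i

-- while e > i and list_my[e-1] >= head: e -= 1
def bTrimE (L : List Int) (head : Int) (i e : Nat) : Nat :=
  if i < e ∧ L.getD (e - 1) 0 ≥ head then bTrimE L head i (e - 1) else e
termination_by e
decreasing_by omega

def my_count_alt (list_my : List Int) : Int :=
  if list_my.length < 3 then 0
  else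
    let n := list_my.length
    let last := PySem.List.pyGetD list_my (-1) 0
    let i := bTrimI list_my last 0
    let head := list_my.getD i 0
    let e := bTrimE list_my head i (n - 1)
    ((e : Int) - (i : Int) - 1) * min head (list_my.getD e 0)
      - (PySem.List.slice list_my (some ((i : Int) + 1)) (some (e : Int))).sum

-- ===== PRECONDITION & SPEC =====
def Spec_my_count (list_my : List Int) (out : Int) : Prop := out = my_count_alt list_my
instance (list_my : List Int) (out : Int) : Decidable (Spec_my_count list_my out) := by unfold Spec_my_count; infer_instance

-- ===== CLAIM (what is proved, stated in full; the proofs are below) =====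
def Claim_equal_my_count : Prop := ∀ (list_my : List Int), Dom_my_count list_my → Spec_my_count list_my (my_count list_my)

-- ===== LEMMAS AND PROOFS =====

theorem bTrimI_bounds (L : List Int) (last : Int) (i : Nat) (h : i < L.length) :
    i ≤ bTrimI L last i ∧ bTrimI L last i < L.length := by
  rw [bTrimI]
  split
  · rename_i hc
    have := bTrimI_bounds L last (i + 1) hc.1
    omega
  · omega
termination_by L.length - i

theorem bTrimE_bounds (L : List Int) (head : Int) (i e : Nat) (h : i ≤ e) :
    i ≤ bTrimE L head i e ∧ bTrimE L head i e ≤ e := by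
  rw [bTrimE]
  split
  · rename_i hc
    have := bTrimE_bounds L head i (e - 1) (by omega)
    omega
  · omega
termination_by e

theorem getD_take_drop (L : List Int) (i e j : Nat) (hj : i + j ≤ e) (he : e < L.length) :
    ((L.drop i).take (e - i + 1)).getD j 0 = L.getD (i + j) 0 := by
  rw [List.getD_eq_getElem?_getD, List.getD_eq_getElem?_getD, List.getElem?_take,
    List.getElem?_drop, if_pos (by omega)]

theorem len_take_drop (L : List Int) (i e : Nat) (hi : i ≤ e) (he : e < L.length) :
    ((L.drop i).take (e - i + 1)).length = e - i + 1 := by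
  simp; omega

theorem pyGetD0_take_drop (L : List Int) (i e : Nat) (hi : i ≤ e) (he : e < L.length) :
    PySem.List.pyGetD ((L.drop i).take (e - i + 1)) 0 0 = L.getD i 0 := by
  have h := getD_take_drop L i e 0 (by omega) he
  rw [PySem.List.pyGetD_zero, h, Nat.add_zero]

theorem pyGetDm2_take_drop (L : List Int) (i e : Nat) (hie : i < e) (he : e < L.length) :
    PySem.List.pyGetD ((L.drop i).take (e - i + 1)) (-2) 0 = L.getD (e - 1) 0 := by
  have hlen := len_take_drop L i e (by omega) he
  rw [PySem.List.pyGetD_neg_ofNat _ 2 0 (by norm_num) (by omega)]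
  rw [List.getElem_eq_getD 0, hlen, show e - i + 1 - 2 = (e - 1) - i by omega]
  have h := getD_take_drop L i e ((e - 1) - i) (by omega) he
  rwa [show i + (e - 1 - i) = e - 1 by omega] at h

theorem pyGetDlast_take_drop (L : List Int) (i e : Nat) (hi : i ≤ e) (he : e < L.length) :
    PySem.List.pyGetD ((L.drop i).take (e - i + 1)) (-1) 0 = L.getD e 0 := by
  have hlen := len_take_drop L i e hi he
  have hne : (L.drop i).take (e - i + 1) ≠ [] := by
    intro hnil; have := congrArg List.length hnil; rw [hlen] at this; simp at this
  rw [PySem.List.pyGetD_neg_one _ _ hne, List.getLast_eq_getElem, List.getElem_eq_getD 0, hlen,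
    show e - i + 1 - 1 = e - i by omega]
  have h := getD_take_drop L i e (e - i) (by omega) he
  rwa [show i + (e - i) = e by omega] at h

theorem trimL_eq (L : List Int) (i : Nat) (h : i < L.length) :
    aTrimL (L.drop i) = L.drop (bTrimI L (PySem.List.pyGetD L (-1) 0) i) := by
  have hne : L.drop i ≠ [] := by
    intro hnil; have := congrArg List.length hnil; simp at this; omega
  have hLne : L ≠ [] := by intro hnil; subst hnil; simp at h
  have hlast : PySem.List.pyGetD (L.drop i) (-1) 0 = PySem.List.pyGetD L (-1) 0 := by
    rw [PySem.List.pyGetD_neg_one _ _ hne, PySem.List.pyGetD_neg_one _ _ hLne,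
      List.getLast_drop]
  have hcond : (1 < (L.drop i).length ∧
      PySem.List.pyGetD (L.drop i) 1 0 ≥ PySem.List.pyGetD (L.drop i) (-1) 0) ↔
      (i + 1 < L.length ∧ L.getD (i + 1) 0 ≥ PySem.List.pyGetD L (-1) 0) := by
    have hlen : (L.drop i).length = L.length - i := by simp
    have hmid : PySem.List.pyGetD (L.drop i) 1 0 = L.getD (i + 1) 0 := by
      simpa [List.getD_eq_getElem?_getD, List.getElem?_drop] using
        PySem.List.pyGetD_natCast (L.drop i) 1 0
    constructor
    · rintro ⟨h1, h2⟩
      rw [hlast, hmid] at h2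
      exact ⟨by omega, h2⟩
    · rintro ⟨h1, h2⟩
      rw [hlast, hmid]
      exact ⟨by omega, h2⟩
  rw [aTrimL, bTrimI]
  by_cases hc : i + 1 < L.length ∧ L.getD (i + 1) 0 ≥ PySem.List.pyGetD L (-1) 0
  · rw [dif_pos (hcond.mpr hc), if_pos hc, List.tail_drop]
    exact trimL_eq L (i + 1) hc.1
  · rw [dif_neg (fun hx => hc (hcond.mp hx)), if_neg hc]
termination_by L.length - i

theorem trimR_eq (L : List Int) (i e : Nat) (hi : i ≤ e) (he : e < L.length) :
    aTrimR ((L.drop i).take (e - i + 1)) =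
      (L.drop i).take (bTrimE L (L.getD i 0) i e - i + 1) := by
  have hlen := len_take_drop L i e hi he
  have hget0 := pyGetD0_take_drop L i e hi he
  have hcond : (2 ≤ ((L.drop i).take (e - i + 1)).length ∧
      PySem.List.pyGetD ((L.drop i).take (e - i + 1)) (-2) 0 ≥
        PySem.List.pyGetD ((L.drop i).take (e - i + 1)) 0 0) ↔
      (i < e ∧ L.getD (e - 1) 0 ≥ L.getD i 0) := by
    constructor
    · rintro ⟨h1, h2⟩
      have hie : i < e := by omega
      rw [hget0, pyGetDm2_take_drop L i e hie he] at h2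
      exact ⟨hie, h2⟩
    · rintro ⟨hie, h2⟩
      rw [hget0, pyGetDm2_take_drop L i e hie he]
      exact ⟨by omega, h2⟩
  rw [aTrimR, bTrimE]
  by_cases hc : i < e ∧ L.getD (e - 1) 0 ≥ L.getD i 0
  · rw [dif_pos (hcond.mpr hc), if_pos hc]
    have hdl : ((L.drop i).take (e - i + 1)).dropLast = (L.drop i).take ((e - 1) - i + 1) := by
      rw [List.dropLast_eq_take, hlen, List.take_take]
      congr 1
      omega
    rw [hdl]
    exact trimR_eq L i (e - 1) (by omega) (by omega)
  · rw [dif_neg (fun hx => hc (hcond.mp hx)), if_neg hc]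
termination_by e

theorem foldl_sub (l : List Int) (s : Int) : l.foldl (fun a b => a - b) s = s - l.sum := by
  induction l generalizing s with
  | nil => simp
  | cons x xs ih => simp [List.foldl_cons, ih, List.sum_cons]; ring

-- ===== VERDICT (by name: the statement is the Claim_ definition above) =====
theorem my_count_spec : Claim_equal_my_count := by
  intro L _
  simp only [Spec_my_count, my_count, my_count_alt]
  by_cases h3 : L.length < 3
  · simp [h3]
  · rw [if_neg h3, if_neg h3]
    have hn : 3 ≤ L.length := by omega
    set last := PySem.List.pyGetD L (-1) 0 with hlastdef
    set i := bTrimI L last 0 with hidef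
    obtain ⟨-, hiub⟩ := bTrimI_bounds L last 0 (by omega)
    rw [← hidef] at hiub
    set head := L.getD i 0 with hheaddef
    set e := bTrimE L head i (L.length - 1) with hedef
    obtain ⟨hie, heub⟩ := bTrimE_bounds L head i (L.length - 1) (by omega)
    rw [← hedef] at hie heub
    have helt : e < L.length := by omega
    -- A's trimmed list equals the index window
    have hL1 : aTrimL L = L.drop i := by
      have := trimL_eq L 0 (by omega)
      simpa using this
    have hfull : L.drop i = (L.drop i).take ((L.length - 1) - i + 1) := by
      rw [List.take_of_length_le]
      simp; omega
    have hL2 : aTrimR (aTrimL L) = (L.drop i).take (e - i + 1) := by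
      rw [hL1, hfull, trimR_eq L i (L.length - 1) (by omega) (by omega), ← hedef,
        List.take_take, Nat.min_eq_left (by omega)]
    rw [hL2]
    have hlen2 := len_take_drop L i e hie helt
    -- the head, last and length of the trimmed list
    have hget0 : PySem.List.pyGetD ((L.drop i).take (e - i + 1)) 0 0 = head :=
      pyGetD0_take_drop L i e hie helt
    have hgetlast := pyGetDlast_take_drop L i e hie helt
    rw [hget0, hgetlast, hlen2]
    -- the middle slice
    have hslice : PySem.List.slice ((L.drop i).take (e - i + 1)) (some 1) (some ((↑(e - i + 1) : Int) - 1)) =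
        PySem.List.slice L (some ((i : Int) + 1)) (some (e : Int)) := by
      rw [show ((↑(e - i + 1) : Int) - 1) = ((e - i : Nat) : Int) by push_cast; omega,
        show ((i : Int) + 1) = ((i + 1 : Nat) : Int) by push_cast; ring,
        show (1 : Int) = ((1 : Nat) : Int) by norm_num,
        PySem.List.slice_natCast, PySem.List.slice_natCast]
      rw [List.drop_take, List.drop_drop, List.take_take]
      congr 1
      omega
    rw [hslice, foldl_sub]
    congr 1
    push_cast
    congr 1
    omega
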